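-- pv_equiv track=rewrite | github.com/Evo-Developer/ledger-app | backend/security_config.py | detect_xss
-- ===== SOURCE A (Python) =====
-- XSS_PATTERNS = [
--     "<script",
--     "javascript:",
--     "onerror=",
--     "onload=",
--     "onclick=",
--     "onfocus=",
--     "onmouseover=",
-- ]
--
-- def detect_xss(text: str) -> bool:
--     """
--     Detect potential XSS attempts
--
--     Args:
--         text: Input text to check
--
--     Returns:
--         True if potential XSS detected
--     """
--     if not text:
--         return False
--
--     text_lower = text.lower()
--
--     for pattern in XSS_PATTERNS:
--         if pattern in text_lower:
--             return True
--
--     return False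
-- ===== SOURCE B (Python) =====
-- XSS_PATTERNS = [
--     "<script",
--     "javascript:",
--     "onerror=",
--     "onload=",
--     "onclick=",
--     "onfocus=",
--     "onmouseover=",
-- ]
--
-- def detect_xss(text: str) -> bool:
--     """Position-major single-pass scan: at each index of the lowered text,
--     check whether any pattern starts there."""
--     if not text:
--         return False
--     t = text.lower()
--     return any(
--         any(t.startswith(p, i) for p in XSS_PATTERNS)
--         for i in range(len(t))
--     )
-- ===== Notes on version B (the rewrite author's own statement) =====
-- stated objective: alternative
-- what changed: A scans pattern-by-pattern with a whole-text substring test per pattern; B makes one position-major pass over the lowered text and checks at each index whether any pattern starts there (the traversal a regex alternation would perform).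
import Mathlib
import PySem

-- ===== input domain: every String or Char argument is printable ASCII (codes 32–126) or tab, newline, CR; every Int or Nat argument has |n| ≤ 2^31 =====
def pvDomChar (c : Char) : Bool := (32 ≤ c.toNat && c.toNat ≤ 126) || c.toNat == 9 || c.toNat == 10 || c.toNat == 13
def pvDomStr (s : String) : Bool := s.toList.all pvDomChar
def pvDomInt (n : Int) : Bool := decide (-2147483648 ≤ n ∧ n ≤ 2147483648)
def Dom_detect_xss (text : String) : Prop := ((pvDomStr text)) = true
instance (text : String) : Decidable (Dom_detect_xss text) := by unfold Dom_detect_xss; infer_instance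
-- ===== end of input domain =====

-- B replaces A's pattern-by-pattern substring scan with one position-major pass
-- over the lowered text (alternative traversal, same cost).


def XSS_PATTERNS : List String :=
  ["<script", "javascript:", "onerror=", "onload=", "onclick=", "onfocus=", "onmouseover="]

-- ===== PORT A =====
-- the 'for pattern in XSS_PATTERNS: if pattern in text_lower: return True' loop
def detectLoopA (pats : List String) (text_lower : String) : Bool :=
  match pats with
  | [] => false
  | pattern :: rest =>
      if PySem.Str.isIn pattern text_lower then true else detectLoopA rest text_lower

def detect_xss (text : String) : Bool :=
  if text == "" then false
  else detectLoopA XSS_PATTERNS (PySem.Str.lower text)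

-- ===== PORT B =====
-- t.startswith(p, i) with 0 ≤ i ≤ len(t) is exactly 'p is a prefix of t from i',
-- i.e. PySem.Chars.startswith (t.drop i) p.
def detect_xss_alt (text : String) : Bool :=
  if text == "" then false
  else
    let t := (PySem.Str.lower text).toList
    (List.range t.length).any fun i =>
      XSS_PATTERNS.any fun p => PySem.Chars.startswith (t.drop i) p.toList

-- ===== PRECONDITION & SPEC =====
def Spec_detect_xss (text : String) (out : Bool) : Prop := out = detect_xss_alt text
instance (text : String) (out : Bool) : Decidable (Spec_detect_xss text out) := by unfold Spec_detect_xss; infer_instance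

-- ===== CLAIM (what is proved, stated in full; the proofs are below) =====
def Claim_equal_detect_xss : Prop := ∀ (text : String), Dom_detect_xss text → Spec_detect_xss text (detect_xss text)

-- ===== LEMMAS AND PROOFS =====

-- A's early-return loop is an 'any' over the pattern list
theorem detectLoopA_eq_any (pats : List String) (t : String) :
    detectLoopA pats t = pats.any (fun p => PySem.Str.isIn p t) := by
  induction pats with
  | nil => rfl
  | cons p rest ih =>
      rw [detectLoopA, ih, List.any_cons]
      split_ifs with h <;> simp_all

-- a nonempty pattern occurs in t iff it starts at some index < t.length
theorem isIn_iff_exists_lt (p t : List Char) (hp : p ≠ []) :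
    PySem.Chars.isIn p t = true ↔ ∃ i < t.length, p <+: t.drop i := by
  rw [← PySem.Chars.exists_prefix_drop_iff_isIn]
  constructor
  · rintro ⟨j, hj⟩
    refine ⟨j, ?_, hj⟩
    by_contra h
    simp only [not_lt] at h
    have : t.drop j = [] := List.drop_eq_nil_of_le h
    rw [this] at hj
    exact hp (List.prefix_nil.mp hj)
  · rintro ⟨i, _, hi⟩; exact ⟨i, hi⟩

theorem pats_ne_nil : ∀ p ∈ XSS_PATTERNS, p.toList ≠ [] := by decide

theorem detect_xss_spec : Claim_equal_detect_xss := by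
  intro text _
  unfold Spec_detect_xss detect_xss detect_xss_alt
  split_ifs with h
  · rfl
  · rw [detectLoopA_eq_any]
    set t := (PySem.Str.lower text).toList with ht
    rw [Bool.eq_iff_iff]
    simp only [List.any_eq_true, List.mem_range]
    constructor
    · rintro ⟨p, hp, hin⟩
      rw [PySem.Str.isIn_iff_infix, ← PySem.Chars.isIn_iff_infix, ← ht] at hin
      obtain ⟨i, hilt, hpref⟩ := (isIn_iff_exists_lt _ _ (pats_ne_nil p hp)).mp hin
      exact ⟨i, hilt, p, hp, (PySem.Chars.startswith_iff _ _).mpr hpref⟩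
    · rintro ⟨i, hilt, p, hp, hsw⟩
      refine ⟨p, hp, ?_⟩
      rw [PySem.Str.isIn_iff_infix, ← PySem.Chars.isIn_iff_infix, ← ht]
      exact (isIn_iff_exists_lt _ _ (pats_ne_nil p hp)).mpr
        ⟨i, hilt, (PySem.Chars.startswith_iff _ _).mp hsw⟩
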